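-- pv_equiv track=rewrite | github.com/SpiceWeasel2718/AoC | 2019/AoC2019_day08.py | part2
-- ===== SOURCE A (Python) =====
-- def part2(input_text):
--     input_text = input_text[0]
--     image = []
--     for i in range(150):
--         for c in input_text[i::150]:
--             if c != '2':
--                 image.append(c if c == '1' else ' ')
--                 break
--         else:
--             image.append('2')
--     return '\n' + '\n'.join([''.join(image[i:i+25]) for i in range(0, 150, 25)])
-- ===== SOURCE B (Python) =====
-- def part2(input_text):
--     s = input_text[0]
--     image = ['2'] * 150
--     for idx, c in enumerate(s):
--         pos = idx % 150
--         if image[pos] == '2' and c != '2':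
--             image[pos] = c if c == '1' else ' '
--     return '\n' + '\n'.join([''.join(image[i:i+25]) for i in range(0, 150, 25)])
-- ===== Notes on version B (the rewrite author's own statement) =====
-- stated objective: alternative
-- what changed: Replaces the 150 per-column strided-slice scans with early break by a single forward pass over the flattened string that paints a 150-cell all-transparent canvas at position idx mod 150 only while that cell is still transparent.
import Mathlib
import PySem

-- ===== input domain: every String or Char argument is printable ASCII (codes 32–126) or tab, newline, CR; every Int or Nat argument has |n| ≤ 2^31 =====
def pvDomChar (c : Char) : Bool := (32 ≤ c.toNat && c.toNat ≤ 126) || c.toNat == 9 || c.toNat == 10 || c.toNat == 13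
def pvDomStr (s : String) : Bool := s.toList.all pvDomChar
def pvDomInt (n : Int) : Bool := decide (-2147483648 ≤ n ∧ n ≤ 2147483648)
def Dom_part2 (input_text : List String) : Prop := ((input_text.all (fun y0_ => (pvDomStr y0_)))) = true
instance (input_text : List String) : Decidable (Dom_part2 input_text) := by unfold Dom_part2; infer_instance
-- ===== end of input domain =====

-- B replaces A's 150 strided-column scans by one forward painting pass over the flattened
-- string (alternative decomposition, same O(n) cost).

-- ===== PORT A =====
-- A's inner loop: 'for c in input_text[i::150]: if c != '2': append(…); break / else: append('2')'
def scanCol : List Char → Char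
  | [] => '2'
  | c :: rest => if c ≠ '2' then (if c = '1' then c else ' ') else scanCol rest

def part2 (input_text : List String) : String :=
  let s := (PySem.List.pyGetD input_text 0 "").toList   -- input_text[0]; Pre_ excludes []
  let image := (PySem.List.pyRange 0 150 1).foldl
    (fun img i => img ++ [scanCol ((PySem.List.slice? s (some i) none 150).getD [])]) []
  "\n" ++ PySem.Str.join "\n" ((PySem.List.pyRange 0 150 25).map
    (fun i => String.ofList (PySem.List.slice image (some i) (some (i + 25)))))

-- ===== PORT B =====
-- B's loop body: pos = idx % 150; paint only if the cell is still transparent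
def paint (img : List Char) (p : Int × Char) : List Char :=
  let pos := PySem.Int.mod p.1 150
  if PySem.List.pyGetD img pos '2' = '2' ∧ p.2 ≠ '2' then
    PySem.List.pySetD img pos (if p.2 = '1' then p.2 else ' ')
  else img

def part2_alt (input_text : List String) : String :=
  let s := (PySem.List.pyGetD input_text 0 "").toList   -- input_text[0]; Pre_ excludes []
  let image := (PySem.List.enumerate s 0).foldl paint (List.replicate 150 '2')
  "\n" ++ PySem.Str.join "\n" ((PySem.List.pyRange 0 150 25).map
    (fun i => String.ofList (PySem.List.slice image (some i) (some (i + 25)))))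

-- ===== PRECONDITION & SPEC =====
-- Pre_ excludes only the empty list, on which A (and B) raise IndexError at input_text[0].
def Pre_part2 (input_text : List String) : Prop := input_text ≠ []
instance (input_text : List String) : Decidable (Pre_part2 input_text) := by unfold Pre_part2; infer_instance
def pvWitness_part2 : List String := ["0211202"]
def Spec_part2 (input_text : List String) (out : String) : Prop := out = part2_alt input_text
instance (input_text : List String) (out : String) : Decidable (Spec_part2 input_text out) := by unfold Spec_part2; infer_instance

-- ===== CLAIM (what is proved, stated in full; the proofs are below) =====
def Claim_equal_part2 : Prop := ∀ (input_text : List String), Dom_part2 input_text → Pre_part2 input_text → Spec_part2 input_text (part2 input_text)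

-- ===== LEMMAS AND PROOFS =====

-- every 150th element of l, starting after a countdown of n: the column xs[i::150]
def strideAux : List Char → Nat → List Char
  | [], _ => []
  | c :: t, 0 => c :: strideAux t 149
  | _ :: t, n + 1 => strideAux t n

def stride (l : List Char) : List Char := strideAux l 0

-- the subsequence of l (first index k) at positions ≡ p (mod 150)
def colOf : List Char → Nat → Nat → List Char
  | [], _, _ => []
  | c :: t, k, p => if k % 150 = p then c :: colOf t (k + 1) p else colOf t (k + 1) p

def resolve (v : Char) (cs : List Char) : Char := if v = '2' then scanCol cs else v

theorem strideAux_eq_drop : ∀ (t : List Char) (n : Nat), strideAux t n = stride (t.drop n) := by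
  intro t
  induction t with
  | nil => intro n; cases n <;> rfl
  | cons c t ih =>
    intro n
    cases n with
    | zero => rfl
    | succ m => rw [List.drop_succ_cons, ← ih m]; rfl

theorem stride_cons (c : Char) (t : List Char) : stride (c :: t) = c :: stride (t.drop 149) := by
  rw [stride]
  show c :: strideAux t 149 = _
  rw [strideAux_eq_drop]

theorem scanCol_cons_ne (c : Char) (r : List Char) (h : c ≠ '2') :
    scanCol (c :: r) = if c = '1' then c else ' ' := by
  unfold scanCol; rw [if_pos h]

theorem scanCol_cons_two (r : List Char) : scanCol ('2' :: r) = scanCol r := by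
  conv_lhs => unfold scanCol
  rw [if_neg (by simp)]

theorem colOf_cons_eq (c : Char) (t : List Char) (k p : Nat) (h : k % 150 = p) :
    colOf (c :: t) k p = c :: colOf t (k + 1) p := by
  conv_lhs => unfold colOf
  rw [if_pos h]

theorem colOf_cons_ne (c : Char) (t : List Char) (k p : Nat) (h : ¬ k % 150 = p) :
    colOf (c :: t) k p = colOf t (k + 1) p := by
  conv_lhs => unfold colOf
  rw [if_neg h]

theorem resolve_nil (v : Char) : resolve v [] = v := by
  unfold resolve
  by_cases h : v = '2'
  · rw [if_pos h, h]; rfl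
  · rw [if_neg h]

theorem length_paint (img : List Char) (p : Int × Char) : (paint img p).length = img.length := by
  unfold paint
  by_cases h : PySem.List.pyGetD img (PySem.Int.mod p.1 150) '2' = '2' ∧ p.2 ≠ '2'
  · rw [if_pos h, PySem.List.length_pySetD]
  · rw [if_neg h]

theorem length_foldl_paint (l : List (Int × Char)) (img : List Char) :
    (l.foldl paint img).length = img.length := by
  induction l generalizing img with
  | nil => rfl
  | cons x t ih => rw [List.foldl_cons, ih, length_paint]

theorem B_inv (l : List Char) (img : List Char) (k : Nat)
    (hlen : img.length = 150) (p : Nat) (hp : p < 150) :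
    ((PySem.List.enumerate l (k : Int)).foldl paint img).getD p '2'
      = resolve (img.getD p '2') (colOf l k p) := by
  induction l generalizing img k with
  | nil => simp [PySem.List.enumerate_nil, colOf, resolve_nil]
  | cons c t ih =>
    rw [PySem.List.enumerate_cons, List.foldl_cons]
    have hcast : ((k : Int) + 1) = ((k + 1 : Nat) : Int) := by push_cast; ring
    rw [hcast, ih (paint img ((k : Int), c)) (k + 1) (by rw [length_paint]; exact hlen)]
    have hmod : PySem.Int.mod (k : Int) 150 = ((k % 150 : Nat) : Int) := by
      rw [PySem.Int.mod_eq_emod_of_pos (by norm_num)]; push_cast; ring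
    have hklt : k % 150 < img.length := by omega
    unfold paint
    simp only [hmod, PySem.List.pyGetD_natCast, PySem.List.pySetD_natCast]
    by_cases hpk : k % 150 = p
    · rw [colOf_cons_eq c t k p hpk]
      subst hpk
      by_cases hg : img.getD (k % 150) '2' = '2' ∧ c ≠ '2'
      · rw [if_pos hg]
        have hset : ((img.set (k % 150) (if c = '1' then c else ' ')).getD (k % 150) '2')
            = (if c = '1' then c else ' ') := by
          rw [List.getD_eq_getElem?_getD, List.getElem?_set_self (by omega)]; rfl
        rw [hset]
        have hv2 : (if c = '1' then c else ' ') ≠ '2' := by split <;> simp_all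
        unfold resolve
        rw [if_neg hv2, if_pos hg.1, scanCol_cons_ne c _ hg.2]
      · rw [if_neg hg]
        unfold resolve
        by_cases h2 : img.getD (k % 150) '2' = '2'
        · have hc : c = '2' := by tauto
          rw [if_pos h2, if_pos h2, hc, scanCol_cons_two]
        · rw [if_neg h2, if_neg h2]
    · rw [colOf_cons_ne c t k p hpk]
      by_cases hg : img.getD (k % 150) '2' = '2' ∧ c ≠ '2'
      · rw [if_pos hg]
        have hne : (img.set (k % 150) (if c = '1' then c else ' ')).getD p '2' = img.getD p '2' := by
          rw [List.getD_eq_getElem?_getD, List.getElem?_set_ne (by omega), ← List.getD_eq_getElem?_getD]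
        rw [hne]
      · rw [if_neg hg]

theorem colOf_stride (l : List Char) (k p : Nat) (hp : p < 150) :
    colOf l k p = stride (l.drop ((p + 150 - k % 150) % 150)) := by
  induction l generalizing k with
  | nil => simp [colOf, stride, strideAux]
  | cons c t ih =>
    by_cases hpk : k % 150 = p
    · have h0 : (p + 150 - k % 150) % 150 = 0 := by omega
      rw [colOf_cons_eq c t k p hpk, h0, List.drop_zero, stride_cons, ih (k + 1)]
      have h149 : (p + 150 - (k + 1) % 150) % 150 = 149 := by omega
      rw [h149]
    · rw [colOf_cons_ne c t k p hpk, ih (k + 1)]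
      have ho : (p + 150 - k % 150) % 150 = (p + 150 - (k + 1) % 150) % 150 + 1 := by omega
      rw [ho, List.drop_succ_cons]

theorem filterMap_stride_aux : ∀ (n : Nat) (d : List Char), d.length ≤ n →
    (List.range ((d.length + 149) / 150)).filterMap (fun k => d[150 * k]?) = stride d := by
  intro n
  induction n with
  | zero =>
    intro d hd
    have hdn : d = [] := List.eq_nil_of_length_eq_zero (by omega)
    subst hdn; rfl
  | succ n ih =>
    intro d hd
    cases d with
    | nil => rfl
    | cons c t =>
      have hm : (List.length (c :: t) + 149) / 150 = t.length / 150 + 1 := by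
        simp only [List.length_cons]; omega
      rw [hm, List.range_succ_eq_map, List.filterMap_cons]
      simp only [List.getElem?_cons_zero, Nat.mul_zero]
      rw [List.filterMap_map, stride_cons]
      congr 1
      have harg : (fun k => (c :: t)[150 * k]?) ∘ Nat.succ
          = (fun k => (t.drop 149)[150 * k]?) := by
        funext k
        simp only [Function.comp]
        have h1 : 150 * Nat.succ k = 150 * k + 149 + 1 := by omega
        rw [h1, List.getElem?_cons_succ, List.getElem?_drop, Nat.add_comm 149 (150 * k)]
      rw [harg, ← ih (t.drop 149) (by simp at hd ⊢; omega)]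
      congr 2
      simp only [List.length_drop]
      omega

theorem filterMap_stride (d : List Char) :
    (List.range ((d.length + 149) / 150)).filterMap (fun k => d[150 * k]?) = stride d :=
  filterMap_stride_aux d.length d le_rfl

theorem slice?_stride (xs : List Char) (i : Nat) :
    PySem.List.slice? xs (some (i : Int)) none 150 = some (stride (xs.drop i)) := by
  unfold PySem.List.slice? PySem.List.sliceIndices
  simp only [if_neg (by norm_num : ¬ (150 : Int) = 0)]
  norm_num
  simp only [if_neg (show ¬((i : Int) < 0) from by omega)]
  by_cases hle : xs.length ≤ i
  · rw [min_eq_right (by exact_mod_cast hle)]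
    rw [if_neg (by omega)]
    simp [List.drop_eq_nil_of_le hle, stride, strideAux]
  · rw [Nat.not_le] at hle
    rw [min_eq_left (by exact_mod_cast hle.le)]
    rw [if_pos (by exact_mod_cast hle)]
    have hcnt : (((xs.length : Int) - (i : Int) + 150 - 1) / 150).toNat
        = ((xs.drop i).length + 149) / 150 := by
      have hc : ((xs.length : Int) - (i : Int) + 150 - 1) = (((xs.length - i + 149 : Nat)) : Int) := by
        push_cast; omega
      rw [hc]
      rw [show ((150 : Int)) = ((150 : Nat) : Int) from rfl]
      rw [← Int.natCast_div, Int.toNat_natCast]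
      simp only [List.length_drop]
    rw [hcnt]
    rw [← filterMap_stride (xs.drop i)]
    apply List.filterMap_congr
    intro k _
    have h2 : ((i : Int) + 150 * (k : Int)).toNat = i + 150 * k := by omega
    rw [h2, ← List.getElem?_drop]

theorem A_image (s : List Char) :
    (PySem.List.pyRange 0 150 1).foldl
      (fun img i => img ++ [scanCol ((PySem.List.slice? s (some i) none 150).getD [])]) []
    = (List.range 150).map (fun p => scanCol (stride (s.drop p))) := by
  rw [PySem.List.foldl_append_singleton_eq_map, List.nil_append]
  rw [PySem.List.pyRange_one]
  norm_num
  rw [show (150 : Int).toNat = 150 from rfl]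
  apply List.map_congr_left
  intro k _
  simp only [Function.comp]
  rw [slice?_stride s k]
  rfl

theorem B_image (s : List Char) :
    (PySem.List.enumerate s 0).foldl paint (List.replicate 150 '2')
    = (List.range 150).map (fun p => scanCol (stride (s.drop p))) := by
  apply List.ext_getElem
  · rw [length_foldl_paint]; simp
  · intro p hp1 hp2
    have hlen : (List.replicate 150 '2' : List Char).length = 150 := by simp
    have hp : p < 150 := by
      rw [length_foldl_paint, hlen] at hp1; exact hp1
    have h0 : ((0 : Nat) : Int) = (0 : Int) := rfl
    have hinv := B_inv s (List.replicate 150 '2') 0 hlen p hp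
    rw [h0] at hinv
    rw [List.getD_eq_getElem _ _ hp1] at hinv
    rw [hinv]
    have hrep : (List.replicate 150 '2' : List Char).getD p '2' = '2' := by
      rw [List.getD_eq_getElem _ _ (by simp [hp]), List.getElem_replicate]
    rw [hrep]
    have hcol : colOf s 0 p = stride (s.drop p) := by
      rw [colOf_stride s 0 p hp]
      congr 2
      omega
    rw [hcol]
    simp [resolve, List.getElem_map, List.getElem_range]

-- ===== VERDICT (by name: the statement is the Claim_ definition above) =====
theorem part2_spec : Claim_equal_part2 := by
  intro input_text _ _
  unfold Spec_part2 part2 part2_alt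
  simp only [A_image, B_image]
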